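-- pv_equiv track=rewrite | github.com/Abdullahprogramme/Algorithimic-problem-solving- | afterMockPractice.py | tax
-- ===== SOURCE A (Python) =====
-- def tax(s,x,y):
--     xC = yC = 0
--     for i in range(len(s) - 1):
--         if s[i] == "0" and s[i + 1] == "1":
--             xC += 1
--         elif s[i] == "1" and s[i + 1] == "0":
--             yC += 1
--     return ( xC * x + yC * y)
-- ===== SOURCE B (Python) =====
-- def tax(s, x, y):
--     # Collapse s into the sequence of maximal-run keys, then count run boundaries.
--     keys = []
--     for c in s:
--         if not keys or keys[-1] != c:
--             keys.append(c)
--     xC = yC = 0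
--     for a, b in zip(keys, keys[1:]):
--         if a == "0" and b == "1":
--             xC += 1
--         elif a == "1" and b == "0":
--             yC += 1
--     return xC * x + yC * y
-- ===== Notes on version B (the rewrite author's own statement) =====
-- stated objective: alternative
-- what changed: Instead of scanning every adjacent index pair of s, B first collapses s into its sequence of maximal-run keys and then counts '0'->'1' and '1'->'0' boundaries between consecutive runs.
import Mathlib
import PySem

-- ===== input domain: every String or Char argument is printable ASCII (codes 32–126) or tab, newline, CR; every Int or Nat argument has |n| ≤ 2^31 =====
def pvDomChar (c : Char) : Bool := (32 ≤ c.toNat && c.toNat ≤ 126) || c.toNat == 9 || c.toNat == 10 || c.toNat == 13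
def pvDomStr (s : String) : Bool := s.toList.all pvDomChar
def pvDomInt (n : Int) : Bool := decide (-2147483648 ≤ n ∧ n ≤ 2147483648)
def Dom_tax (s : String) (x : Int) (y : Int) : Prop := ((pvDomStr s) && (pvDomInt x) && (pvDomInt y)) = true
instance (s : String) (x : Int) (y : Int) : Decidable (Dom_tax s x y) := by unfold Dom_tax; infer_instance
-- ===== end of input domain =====

-- B collapses the string into its maximal-run keys and counts run boundaries,
-- instead of A's scan over every adjacent index pair (alternative decomposition, same cost).


-- ===== PORT A =====
-- for i in range(len(s)-1): test s[i], s[i+1]; accumulate (xC, yC); return xC*x + yC*y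
def tax (s : String) (x : Int) (y : Int) : Int :=
  let st := (PySem.List.pyRange 0 (PySem.Str.len s - 1) 1).foldl
    (fun (st : Int × Int) i =>
      if PySem.Str.pyGet? s i = some '0' ∧ PySem.Str.pyGet? s (i + 1) = some '1' then
        (st.1 + 1, st.2)
      else if PySem.Str.pyGet? s i = some '1' ∧ PySem.Str.pyGet? s (i + 1) = some '0' then
        (st.1, st.2 + 1)
      else st) (0, 0)
  st.1 * x + st.2 * y

-- ===== PORT B =====
-- keys.append(c) unless keys already ends with c  (run-key collapse)
def taxKeyStep (ks : List Char) (c : Char) : List Char :=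
  if ks = [] ∨ ks.getLast? ≠ some c then ks ++ [c] else ks

-- the body of B's loop over zip(keys, keys[1:])
def taxPairStep (st : Int × Int) (p : Char × Char) : Int × Int :=
  if p.1 = '0' ∧ p.2 = '1' then (st.1 + 1, st.2)
  else if p.1 = '1' ∧ p.2 = '0' then (st.1, st.2 + 1)
  else st

def tax_alt (s : String) (x : Int) (y : Int) : Int :=
  let keys := s.toList.foldl taxKeyStep []
  let st := (keys.zip keys.tail).foldl taxPairStep (0, 0)
  st.1 * x + st.2 * y

-- ===== PRECONDITION & SPEC =====
def Spec_tax (s : String) (x : Int) (y : Int) (out : Int) : Prop := out = tax_alt s x y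
instance (s : String) (x : Int) (y : Int) (out : Int) : Decidable (Spec_tax s x y out) := by unfold Spec_tax; infer_instance

-- ===== CLAIM (what is proved, stated in full; the proofs are below) =====
def Claim_equal_tax : Prop := ∀ (s : String) (x : Int) (y : Int), Dom_tax s x y → Spec_tax s x y (tax s x y)

-- ===== LEMMAS AND PROOFS =====

-- front-recursive characterisation of the run-key collapse
def rcollapse : List Char → List Char
  | [] => []
  | [a] => [a]
  | a :: b :: t => if a = b then rcollapse (b :: t) else a :: rcollapse (b :: t)

theorem foldl_taxKeyStep (t : List Char) (ks : List Char) (a : Char) :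
    List.foldl taxKeyStep (ks ++ [a]) t = ks ++ rcollapse (a :: t) := by
  induction t generalizing ks a with
  | nil => simp [rcollapse]
  | cons c t ih =>
    by_cases h : a = c
    · subst h
      have hstep : taxKeyStep (ks ++ [a]) a = ks ++ [a] := by
        simp [taxKeyStep]
      rw [List.foldl_cons, hstep, ih]
      simp [rcollapse]
    · have hstep : taxKeyStep (ks ++ [a]) c = ks ++ [a] ++ [c] := by
        simp [taxKeyStep, h]
      rw [List.foldl_cons, hstep, ih (ks ++ [a]) c]
      simp [rcollapse, h]

theorem keys_eq_rcollapse (l : List Char) : l.foldl taxKeyStep [] = rcollapse l := by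
  cases l with
  | nil => rfl
  | cons a t =>
    have h0 : taxKeyStep [] a = [a] := by simp [taxKeyStep]
    have := foldl_taxKeyStep t [] a
    simpa [h0] using this

theorem rcollapse_head : ∀ (t : List Char) (b : Char), ∃ u, rcollapse (b :: t) = b :: u
  | [], _ => ⟨[], rfl⟩
  | c :: t, b => by
    by_cases h : b = c
    · subst h
      obtain ⟨u, hu⟩ := rcollapse_head t b
      exact ⟨u, by simp [rcollapse, hu]⟩
    · exact ⟨rcollapse (c :: t), by simp [rcollapse, h]⟩

def pairFold (l : List Char) (st : Int × Int) : Int × Int :=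
  (l.zip l.tail).foldl taxPairStep st

theorem pairFold_cons_cons (a b : Char) (u : List Char) (st : Int × Int) :
    pairFold (a :: b :: u) st = pairFold (b :: u) (taxPairStep st (a, b)) := rfl

theorem taxPairStep_same (st : Int × Int) (c : Char) : taxPairStep st (c, c) = st := by
  unfold taxPairStep
  split_ifs with h1 h2
  · exact absurd (h1.1.symm.trans h1.2) (by decide)
  · exact absurd (h2.1.symm.trans h2.2) (by decide)
  · rfl

theorem pairFold_rcollapse (l : List Char) : ∀ st, pairFold (rcollapse l) st = pairFold l st := by
  induction l with
  | nil => intro st; rfl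
  | cons a t ih =>
    cases t with
    | nil => intro st; rfl
    | cons b t =>
      intro st
      by_cases h : a = b
      · subst h
        rw [pairFold_cons_cons, taxPairStep_same]
        simpa [rcollapse] using ih st
      · obtain ⟨u, hu⟩ := rcollapse_head t b
        rw [show rcollapse (a :: b :: t) = a :: rcollapse (b :: t) by simp [rcollapse, h],
          hu, pairFold_cons_cons, ← hu, ih, pairFold_cons_cons]

-- A's index loop, rewritten over Nat indices, is the adjacent-pair fold
theorem rangeFold (l : List Char) : ∀ st : Int × Int,
    (List.range (l.length - 1)).foldl
      (fun st k =>
        if l[k]? = some '0' ∧ l[k + 1]? = some '1' then (st.1 + 1, st.2)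
        else if l[k]? = some '1' ∧ l[k + 1]? = some '0' then (st.1, st.2 + 1)
        else st) st = pairFold l st := by
  induction l with
  | nil => intro st; rfl
  | cons a t ih =>
    cases t with
    | nil => intro st; rfl
    | cons b t =>
      intro st
      have hlen : (a :: b :: t).length - 1 = ((b :: t).length - 1) + 1 := by simp
      rw [hlen, List.range_succ_eq_map, List.foldl_cons, List.foldl_map]
      have ih' := ih (taxPairStep st (a, b))
      simp only [List.getElem?_cons_succ, List.getElem?_cons_zero, Option.some.injEq] at ih' ⊢
      rw [pairFold_cons_cons, ← ih']
      simp only [taxPairStep, List.length_cons, Nat.add_sub_cancel]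
      rfl

theorem tax_eq_pairFold (s : String) (x y : Int) :
    tax s x y = (pairFold s.toList (0, 0)).1 * x + (pairFold s.toList (0, 0)).2 * y := by
  have hdef : tax s x y =
      ((PySem.List.pyRange 0 (PySem.Str.len s - 1) 1).foldl
        (fun (st : Int × Int) i =>
          if PySem.Str.pyGet? s i = some '0' ∧ PySem.Str.pyGet? s (i + 1) = some '1' then
            (st.1 + 1, st.2)
          else if PySem.Str.pyGet? s i = some '1' ∧ PySem.Str.pyGet? s (i + 1) = some '0' then
            (st.1, st.2 + 1)
          else st) (0, 0)).1 * x +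
      ((PySem.List.pyRange 0 (PySem.Str.len s - 1) 1).foldl
        (fun (st : Int × Int) i =>
          if PySem.Str.pyGet? s i = some '0' ∧ PySem.Str.pyGet? s (i + 1) = some '1' then
            (st.1 + 1, st.2)
          else if PySem.Str.pyGet? s i = some '1' ∧ PySem.Str.pyGet? s (i + 1) = some '0' then
            (st.1, st.2 + 1)
          else st) (0, 0)).2 * y := rfl
  have hl : ((PySem.Str.len s - 1) - 0).toNat = s.toList.length - 1 := by
    simp only [PySem.Str.len_eq, Int.sub_zero]
    omega
  have hfold : (PySem.List.pyRange 0 (PySem.Str.len s - 1) 1).foldl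
        (fun (st : Int × Int) i =>
          if PySem.Str.pyGet? s i = some '0' ∧ PySem.Str.pyGet? s (i + 1) = some '1' then
            (st.1 + 1, st.2)
          else if PySem.Str.pyGet? s i = some '1' ∧ PySem.Str.pyGet? s (i + 1) = some '0' then
            (st.1, st.2 + 1)
          else st) (0, 0) = pairFold s.toList (0, 0) := by
    rw [PySem.List.pyRange_one, hl, List.foldl_map, ← rangeFold s.toList (0, 0)]
    congr 1
    funext st k
    have h1 : PySem.Str.pyGet? s ((0 : Int) + k) = s.toList[k]? := by
      rw [zero_add, PySem.Str.pyGet?_natCast]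
    have h2 : PySem.Str.pyGet? s ((0 : Int) + k + 1) = s.toList[k + 1]? := by
      have hc : ((0 : Int) + k + 1) = ((k + 1 : Nat) : Int) := by push_cast; ring
      rw [hc, PySem.Str.pyGet?_natCast]
    rw [h1, h2]
  rw [hdef, hfold]

-- ===== VERDICT (by name: the statement is the Claim_ definition above) =====
theorem tax_spec : Claim_equal_tax := by
  intro s x y _
  unfold Spec_tax tax_alt
  rw [tax_eq_pairFold, keys_eq_rcollapse]
  show _ = (pairFold (rcollapse s.toList) (0, 0)).1 * x + (pairFold (rcollapse s.toList) (0, 0)).2 * y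
  rw [pairFold_rcollapse]
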